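-- pv_equiv track=rewrite | github.com/WhitecrowAurora/lora-rescripts | launcher/core/recommendation.py | _choose_primary_adapter
-- ===== SOURCE A (Python) =====
-- from typing import Any, Dict, List, Optional
--
-- def _choose_primary_adapter(adapters: List[Dict[str, str]]) -> Optional[Dict[str, str]]:
--     """Prefer discrete NVIDIA first, then Intel, then AMD, then any non-basic adapter."""
--
--     useful = [
--         adapter
--         for adapter in adapters
--         if "microsoft basic" not in adapter.get("name", "").lower()
--     ]
--     if not useful:
--         useful = adapters
--
--     vendor_priority = {"nvidia": 0, "intel": 1, "amd": 2, "unknown": 3}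
--     useful.sort(key=lambda item: vendor_priority.get(item.get("vendor", "unknown"), 99))
--     return useful[0] if useful else None
-- ===== SOURCE B (Python) =====
-- def _choose_primary_adapter(adapters):
--     """Prefer discrete NVIDIA first, then Intel, then AMD, then any non-basic adapter."""
--     useful = [
--         adapter
--         for adapter in adapters
--         if "microsoft basic" not in adapter.get("name", "").lower()
--     ]
--     if not useful:
--         useful = adapters
--     for vendor in ("nvidia", "intel", "amd", "unknown"):
--         for item in useful:
--             if item.get("vendor", "unknown") == vendor:
--                 return item
--     return useful[0] if useful else None
-- ===== Notes on version B (the rewrite author's own statement) =====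
-- stated objective: alternative
-- what changed: Replaces the sort-by-priority-key-then-take-first with an explicit scan per preference level: for each vendor in ('nvidia','intel','amd','unknown') return the first matching adapter, falling back to useful[0] for out-of-table vendors.
import Mathlib
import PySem

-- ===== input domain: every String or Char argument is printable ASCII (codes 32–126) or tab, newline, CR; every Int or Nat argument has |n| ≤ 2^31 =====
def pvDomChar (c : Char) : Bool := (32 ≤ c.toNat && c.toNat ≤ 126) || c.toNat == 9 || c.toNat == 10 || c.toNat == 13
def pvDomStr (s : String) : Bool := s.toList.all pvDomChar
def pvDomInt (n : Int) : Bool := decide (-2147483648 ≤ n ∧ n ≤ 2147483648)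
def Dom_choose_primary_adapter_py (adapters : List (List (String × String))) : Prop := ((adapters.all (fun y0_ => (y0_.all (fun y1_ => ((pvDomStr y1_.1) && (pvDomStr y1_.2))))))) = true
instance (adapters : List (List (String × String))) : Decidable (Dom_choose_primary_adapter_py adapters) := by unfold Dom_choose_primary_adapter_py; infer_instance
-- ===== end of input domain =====

-- B replaces A's sort-by-priority-key with one explicit scan per preference level ('alternative'
-- decomposition); equivalence is about the RETURN value only — A's in-place sort can mutate the
-- caller's list when every adapter name contains 'microsoft basic', B never mutates.

-- ===== PORT A =====
-- `adapter.get(key, default)` on an association-list dict (first-match lookup).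
def pvDictGetStr (a : List (String × String)) (k d : String) : String :=
  (PySem.Dict.mk a).getD k d

-- the literal `vendor_priority` dict of A
def pvVendorPriority : PySem.Dict String Int :=
  PySem.Dict.mk [("nvidia", 0), ("intel", 1), ("amd", 2), ("unknown", 3)]

def choose_primary_adapter_py (adapters : List (List (String × String))) : Option (List (String × String)) :=
  let useful := adapters.filter (fun adapter =>
    !(PySem.Str.isIn "microsoft basic" (PySem.Str.lower (pvDictGetStr adapter "name" ""))))
  let useful := if useful.isEmpty then adapters else useful
  let sortedUseful := PySem.List.sorted useful
    (fun item => pvVendorPriority.getD (pvDictGetStr item "vendor" "unknown") 99) false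
  sortedUseful.head?

-- ===== PORT B =====
-- the `for vendor in (…): for item in useful: …` double loop of B
def pvScanLevels (useful : List (List (String × String))) : List String → Option (List (String × String))
  | [] => none
  | v :: rest =>
    match useful.find? (fun item => pvDictGetStr item "vendor" "unknown" == v) with
    | some it => some it
    | none => pvScanLevels useful rest

def choose_primary_adapter_py_alt (adapters : List (List (String × String))) : Option (List (String × String)) :=
  let useful := adapters.filter (fun adapter =>
    !(PySem.Str.isIn "microsoft basic" (PySem.Str.lower (pvDictGetStr adapter "name" ""))))
  let useful := if useful.isEmpty then adapters else useful
  match pvScanLevels useful ["nvidia", "intel", "amd", "unknown"] with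
  | some it => some it
  | none => useful.head?

-- ===== PRECONDITION & SPEC =====
def Spec_choose_primary_adapter_py (adapters : List (List (String × String))) (out : Option (List (String × String))) : Prop := out = choose_primary_adapter_py_alt adapters
instance (adapters : List (List (String × String))) (out : Option (List (String × String))) : Decidable (Spec_choose_primary_adapter_py adapters out) := by unfold Spec_choose_primary_adapter_py; infer_instance

-- ===== CLAIM (what is proved, stated in full; the proofs are below) =====
def Claim_equal_choose_primary_adapter_py : Prop := ∀ (adapters : List (List (String × String))), Dom_choose_primary_adapter_py adapters → Spec_choose_primary_adapter_py adapters (choose_primary_adapter_py adapters)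

-- ===== LEMMAS AND PROOFS =====

-- first element of the list attaining the minimal key (ties go to the earlier element)
def pvFirstMin {α : Type} (k : α → Int) : List α → Option α
  | [] => none
  | x :: t =>
    match pvFirstMin k t with
    | none => some x
    | some m => if k m < k x then some m else some x

theorem pvHead_insertBy {α : Type} (k : α → Int) (x : α) (acc : List α) :
    (PySem.List.insertBy (fun a b => decide (k a < k b)) x acc).head? =
      some (match acc with
            | [] => x
            | y :: _ => if k x < k y then x else y) := by
  cases acc with
  | nil => simp [PySem.List.insertBy]
  | cons y ys =>
    simp only [PySem.List.insertBy]
    split_ifs <;> simp_all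

theorem pvHead_foldl_insertBy {α : Type} (k : α → Int) (xs acc : List α) :
    (xs.foldl (fun acc x => PySem.List.insertBy (fun a b => decide (k a < k b)) x acc) acc).head? =
      match acc.head?, pvFirstMin k xs with
      | none, r => r
      | some h, none => some h
      | some h, some m => some (if k m < k h then m else h) := by
  induction xs generalizing acc with
  | nil => cases acc <;> simp [pvFirstMin]
  | cons x t ih =>
    simp only [List.foldl_cons]
    rw [ih]
    rw [pvHead_insertBy]
    cases acc with
    | nil =>
      simp only [pvFirstMin]
      cases h : pvFirstMin k t <;> simp_all <;> split_ifs <;> simp_all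
    | cons y ys =>
      simp only [pvFirstMin, List.head?_cons]
      cases h : pvFirstMin k t <;> simp_all <;> split_ifs <;> simp_all <;> omega

theorem pvHead_sorted {α : Type} (k : α → Int) (xs : List α) :
    (PySem.List.sorted xs k false).head? = pvFirstMin k xs := by
  rw [PySem.List.sorted_eq_foldl_insertBy, pvHead_foldl_insertBy]
  simp

theorem pvFirstMin_none {α : Type} (k : α → Int) {xs : List α}
    (h : pvFirstMin k xs = none) : xs = [] := by
  cases xs with
  | nil => rfl
  | cons a b =>
    simp only [pvFirstMin] at h
    cases h' : pvFirstMin k b with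
    | none => simp only [h'] at h; exact absurd h (by simp)
    | some m' =>
      simp only [h'] at h
      split_ifs at h <;> exact absurd h (by simp)

theorem pvFirstMin_mem {α : Type} (k : α → Int) {xs : List α} {m : α}
    (h : pvFirstMin k xs = some m) : m ∈ xs := by
  induction xs with
  | nil => simp [pvFirstMin] at h
  | cons x t ih =>
    simp only [pvFirstMin] at h
    cases h' : pvFirstMin k t with
    | none => simp only [h'] at h; simp_all
    | some m' =>
      simp only [h'] at h
      split_ifs at h <;> simp only [Option.some.injEq] at h <;> subst h
      · exact List.mem_cons_of_mem _ (ih h')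
      · exact List.mem_cons_self ..

theorem pvFirstMin_isMin {α : Type} (k : α → Int) {xs : List α} {m : α}
    (h : pvFirstMin k xs = some m) : ∀ y ∈ xs, k m ≤ k y := by
  induction xs generalizing m with
  | nil => simp [pvFirstMin] at h
  | cons x t ih =>
    simp only [pvFirstMin] at h
    cases h' : pvFirstMin k t with
    | none =>
      simp only [h'] at h
      simp only [Option.some.injEq] at h
      subst h
      have ht := pvFirstMin_none k h'
      subst ht
      simp
    | some m' =>
      simp only [h'] at h
      split_ifs at h with hc <;> simp only [Option.some.injEq] at h <;> subst h <;>
        intro y hy <;> rcases List.mem_cons.mp hy with rfl | hyt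
      · omega
      · exact ih h' y hyt
      · exact le_refl _
      · have := ih h' y hyt; omega

theorem pvFirstMin_find {α : Type} (k : α → Int) {xs : List α} {m : α}
    (h : pvFirstMin k xs = some m) :
    xs.find? (fun y => k y == k m) = some m := by
  induction xs generalizing m with
  | nil => simp [pvFirstMin] at h
  | cons x t ih =>
    simp only [pvFirstMin] at h
    cases h' : pvFirstMin k t with
    | none =>
      simp only [h'] at h
      simp only [Option.some.injEq] at h
      subst h
      simp
    | some m' =>
      simp only [h'] at h
      split_ifs at h with hc <;> simp only [Option.some.injEq] at h <;> subst h
      · have : (k x == k m') = false := by simp; omega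
        simp [this, ih h']
      · simp

theorem pvPriority_cases (s : String) :
    pvVendorPriority.getD s 99 =
      (if s = "nvidia" then 0 else if s = "intel" then 1 else if s = "amd" then 2
       else if s = "unknown" then 3 else 99) := by
  simp only [pvVendorPriority, PySem.Dict.getD, PySem.Dict.get?_mk_cons]
  split_ifs <;> simp_all [Option.getD, PySem.Dict.get?]

theorem pvScan_eq_firstMin (k : List (String × String) → Int)
    (hk : ∀ item, k item = pvVendorPriority.getD (pvDictGetStr item "vendor" "unknown") 99)
    (us : List (List (String × String))) :
    (match pvScanLevels us ["nvidia", "intel", "amd", "unknown"] with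
     | some it => some it
     | none => us.head?) = pvFirstMin k us := by
  have hv : ∀ item, k item = 0 ∨ k item = 1 ∨ k item = 2 ∨ k item = 3 ∨ k item = 99 := by
    intro item
    rw [hk, pvPriority_cases]
    split_ifs <;> simp
  have hbr : ∀ (v : String) (n : Int),
      (∀ s : String, (pvVendorPriority.getD s 99 = n) ↔ s = v) →
      (fun item => pvDictGetStr item "vendor" "unknown" == v) =
        (fun item => k item == n) := by
    intro v n hvn
    funext item
    rw [hk]
    by_cases h : pvDictGetStr item "vendor" "unknown" = v
    · have hg : pvVendorPriority.getD v 99 = n := (hvn v).mpr rfl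
      simp [h, hg]
    · have : ¬ pvVendorPriority.getD (pvDictGetStr item "vendor" "unknown") 99 = n :=
        fun hc => h ((hvn _).mp hc)
      simp [h, this]
  have e0 := hbr "nvidia" 0 (by intro s; rw [pvPriority_cases]; split_ifs <;> simp_all)
  have e1 := hbr "intel" 1 (by intro s; rw [pvPriority_cases]; split_ifs <;> simp_all)
  have e2 := hbr "amd" 2 (by intro s; rw [pvPriority_cases]; split_ifs <;> simp_all)
  have e3 := hbr "unknown" 3 (by intro s; rw [pvPriority_cases]; split_ifs <;> simp_all)
  simp only [pvScanLevels, e0, e1, e2, e3]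
  cases hfm : pvFirstMin k us with
  | none =>
    have := pvFirstMin_none k hfm
    subst this
    simp
  | some m =>
    have hmem := pvFirstMin_mem k hfm
    have hmin := pvFirstMin_isMin k hfm
    have hfind := pvFirstMin_find k hfm
    have hnone : ∀ n : Int, n < k m → us.find? (fun y => k y == n) = none := by
      intro n hn
      rw [List.find?_eq_none]
      intro x hx
      have := hmin x hx
      simp only [beq_iff_eq]
      omega
    rcases hv m with h0 | h1 | h2 | h3 | h99
    · rw [h0] at hfind; rw [hfind]
    · rw [h1] at hfind
      rw [hnone 0 (by omega), hfind]
    · rw [h2] at hfind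
      rw [hnone 0 (by omega), hnone 1 (by omega), hfind]
    · rw [h3] at hfind
      rw [hnone 0 (by omega), hnone 1 (by omega), hnone 2 (by omega), hfind]
    · rw [hnone 0 (by omega), hnone 1 (by omega), hnone 2 (by omega), hnone 3 (by omega)]
      cases us with
      | nil => simp at hmem
      | cons x t =>
        simp only [List.head?_cons, Option.some.injEq]
        simp only [pvFirstMin] at hfm
        cases h' : pvFirstMin k t with
        | none => simp only [h'] at hfm; simp_all
        | some m' =>
          simp only [h'] at hfm
          have hx : k m ≤ k x := hmin x (List.mem_cons_self ..)
          have hm' : k m ≤ k m' := hmin m' (List.mem_cons_of_mem _ (pvFirstMin_mem k h'))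
          have hxv := hv x
          have hm'v := hv m'
          have : ¬ k m' < k x := by omega
          simp only [this, if_false] at hfm
          simp_all

-- ===== VERDICT (by name: the statement is the Claim_ definition above) =====
theorem choose_primary_adapter_py_spec : Claim_equal_choose_primary_adapter_py := by
  intro adapters _
  unfold Spec_choose_primary_adapter_py choose_primary_adapter_py choose_primary_adapter_py_alt
  rw [pvHead_sorted]
  exact (pvScan_eq_firstMin _ (fun _ => rfl) _).symm
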